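-- pv_equiv track=rewrite | github.com/AmulyaJain123/ML-Sentiment | bow.py | classify_review
-- ===== SOURCE A (Python) =====
-- def create_feature_vector(review, vocabulary):
--     review_words = review.lower().split()
--     feature_vector = []
--     for word in vocabulary:
--         if word in review_words:
--             feature_vector.append(1)
--         else:
--             feature_vector.append(0)
--     return feature_vector
--
-- def classify_review(review, vocabulary, positive_counts, negative_counts):
--     feature_vector = create_feature_vector(review, vocabulary)
--     positive_score = 0
--     negative_score = 0
--
--     for i in range(len(vocabulary)):
--         if feature_vector[i] == 1:
--             positive_score += positive_counts[i]
--             negative_score += negative_counts[i]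
--
--     return "Positive" if positive_score > negative_score else "Negative"
-- ===== SOURCE B (Python) =====
-- def classify_review(review, vocabulary, positive_counts, negative_counts):
--     scores = {}
--     for word, p, n in zip(vocabulary, positive_counts, negative_counts):
--         sp, sn = scores.get(word, (0, 0))
--         scores[word] = (sp + p, sn + n)
--     positive_score = 0
--     negative_score = 0
--     for word in set(review.lower().split()):
--         if word in scores:
--             p, n = scores[word]
--             positive_score += p
--             negative_score += n
--     return "Positive" if positive_score > negative_score else "Negative"
-- ===== Notes on version B (the rewrite author's own statement) =====
-- stated objective: alternative
-- what changed: Replaces A's build-a-0/1-feature-vector-then-rescan-by-index structure with a word-keyed dict of aggregated (positive, negative) count pairs built once from zip, then a single lookup pass over the distinct review words.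
import Mathlib
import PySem

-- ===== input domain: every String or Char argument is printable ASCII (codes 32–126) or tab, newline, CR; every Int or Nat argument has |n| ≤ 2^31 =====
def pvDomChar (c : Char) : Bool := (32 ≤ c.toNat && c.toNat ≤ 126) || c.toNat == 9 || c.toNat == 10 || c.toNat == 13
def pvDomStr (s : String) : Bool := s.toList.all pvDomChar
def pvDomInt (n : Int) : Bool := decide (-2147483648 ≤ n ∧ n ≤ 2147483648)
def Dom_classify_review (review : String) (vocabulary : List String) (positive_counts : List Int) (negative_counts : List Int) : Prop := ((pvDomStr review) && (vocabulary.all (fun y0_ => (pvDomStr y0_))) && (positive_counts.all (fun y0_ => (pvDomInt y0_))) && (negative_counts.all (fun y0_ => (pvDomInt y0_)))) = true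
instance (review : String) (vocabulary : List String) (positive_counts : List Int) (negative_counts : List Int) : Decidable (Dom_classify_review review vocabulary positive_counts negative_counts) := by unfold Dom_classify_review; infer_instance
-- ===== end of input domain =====

-- B replaces A's 0/1 feature vector + index rescan by a word-keyed dict of aggregated (pos, neg)
-- count pairs built once from zip, then one lookup pass over the distinct review words (alternative decomposition).

-- ===== PORT A =====
def create_feature_vector (review : String) (vocabulary : List String) : List Int :=
  let review_words := PySem.Str.split₀ (PySem.Str.lower review)
  vocabulary.foldl (fun fv word =>
    if review_words.contains word then fv ++ [(1 : Int)] else fv ++ [(0 : Int)]) []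

def classify_review (review : String) (vocabulary : List String) (positive_counts : List Int) (negative_counts : List Int) : String :=
  let feature_vector := create_feature_vector review vocabulary
  let st := (PySem.List.pyRange 0 (vocabulary.length : Int) 1).foldl
    (fun (s : Int × Int) i =>
      if PySem.List.pyGetD feature_vector i 0 == 1 then
        (s.1 + PySem.List.pyGetD positive_counts i 0, s.2 + PySem.List.pyGetD negative_counts i 0)
      else s) (0, 0)
  if st.1 > st.2 then "Positive" else "Negative"

-- ===== PORT B =====
def classify_review_alt (review : String) (vocabulary : List String) (positive_counts : List Int) (negative_counts : List Int) : String :=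
  let scores : PySem.Dict String (Int × Int) :=
    ((vocabulary.zip positive_counts).zip negative_counts).foldl
      (fun d x => d.modify x.1.1 (0, 0) (fun s => (s.1 + x.1.2, s.2 + x.2))) PySem.Dict.empty
  let st := (PySem.Set.ofList (PySem.Str.split₀ (PySem.Str.lower review))).foldl
    (fun (s : Int × Int) word =>
      if scores.contains word then
        (s.1 + (scores.getD word (0, 0)).1, s.2 + (scores.getD word (0, 0)).2)
      else s) (0, 0)
  if st.1 > st.2 then "Positive" else "Negative"

-- ===== PRECONDITION & SPEC =====
-- Pre_ excludes exactly the inputs on which A raises IndexError: a vocabulary word occurring in the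
-- review whose index is beyond positive_counts or negative_counts.
def Pre_classify_review (review : String) (vocabulary : List String) (positive_counts : List Int) (negative_counts : List Int) : Prop :=
  ∀ i : Fin vocabulary.length,
    (PySem.Str.split₀ (PySem.Str.lower review)).contains vocabulary[i] = true →
    i.1 < positive_counts.length ∧ i.1 < negative_counts.length
instance (review : String) (vocabulary : List String) (positive_counts : List Int) (negative_counts : List Int) : Decidable (Pre_classify_review review vocabulary positive_counts negative_counts) := by unfold Pre_classify_review; infer_instance

def pvWitness_classify_review : String × List String × List Int × List Int :=
  ("a Good film", ["good", "bad"], [3, 1], [1, 2])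

def Spec_classify_review (review : String) (vocabulary : List String) (positive_counts : List Int) (negative_counts : List Int) (out : String) : Prop := out = classify_review_alt review vocabulary positive_counts negative_counts
instance (review : String) (vocabulary : List String) (positive_counts : List Int) (negative_counts : List Int) (out : String) : Decidable (Spec_classify_review review vocabulary positive_counts negative_counts out) := by unfold Spec_classify_review; infer_instance

-- ===== CLAIM (what is proved, stated in full; the proofs are below) =====
def Claim_equal_classify_review : Prop := ∀ (review : String) (vocabulary : List String) (positive_counts : List Int) (negative_counts : List Int), Dom_classify_review review vocabulary positive_counts negative_counts → Pre_classify_review review vocabulary positive_counts negative_counts → Spec_classify_review review vocabulary positive_counts negative_counts (classify_review review vocabulary positive_counts negative_counts)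

-- ===== LEMMAS AND PROOFS =====

-- a fold adding (f x, g x) to a pair when c x holds is the pair of filtered sums
theorem pv_foldl_pair_if {α : Type} (l : List α) (c : α → Bool) (f g : α → Int) :
    ∀ a b : Int, l.foldl (fun (s : Int × Int) x => if c x then (s.1 + f x, s.2 + g x) else s) (a, b)
      = (a + (l.map (fun x => if c x then f x else 0)).sum,
         b + (l.map (fun x => if c x then g x else 0)).sum) := by
  induction l with
  | nil => simp
  | cons x t ih =>
    intro a b
    by_cases h : c x = true <;> simp [h, ih, add_assoc]

theorem pv_sum_map_add {α : Type} (l : List α) (f g : α → Int) :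
    (l.map (fun x => f x + g x)).sum = (l.map f).sum + (l.map g).sum := by
  induction l with
  | nil => simp
  | cons x t ih => simp [ih]; ring

-- over a Nodup list, the sum of "if k == w then c else 0" is c iff k occurs
theorem pv_sum_map_ite_eq (W : List String) (hW : W.Nodup) (k : String) (c : Int) :
    (W.map (fun w => if k == w then c else 0)).sum = if W.contains k then c else 0 := by
  induction W with
  | nil => simp
  | cons w W ih =>
    rcases List.nodup_cons.mp hW with ⟨hw, hW'⟩
    simp only [List.map_cons, List.sum_cons, ih hW']
    by_cases h : k = w
    · subst h
      simp [hw]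
    · simp [h, Ne.symm h]

-- grouping: summing per distinct key over a Nodup key list equals one filtered pass
theorem pv_group_sum {α : Type} (key : α → String) (v : α → Int) :
    ∀ (t : List α) (W : List String), W.Nodup →
      (W.map (fun w => ((t.filter (fun x => key x == w)).map v).sum)).sum
        = ((t.filter (fun x => W.contains (key x))).map v).sum := by
  intro t
  induction t with
  | nil => intro W _; simp
  | cons x t ih =>
    intro W hW
    have hstep : ∀ w : String,
        (((x :: t).filter (fun y => key y == w)).map v).sum
          = (if key x == w then v x else 0) + ((t.filter (fun y => key y == w)).map v).sum := by
      intro w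
      by_cases h : key x = w <;> simp [List.filter_cons, h]
    rw [List.map_congr_left (fun w _ => hstep w), pv_sum_map_add,
        pv_sum_map_ite_eq W hW (key x) (v x), ih W hW]
    by_cases h : key x ∈ W <;> simp [List.filter_cons, h]

-- membership in the aggregation dict is membership among the zip entries' keys
theorem pv_dict_contains :
    ∀ (t : List ((String × Int) × Int)) (d : PySem.Dict String (Int × Int)) (w : String),
      (t.foldl (fun d x => d.modify x.1.1 (0, 0) (fun s => (s.1 + x.1.2, s.2 + x.2))) d).contains w
        = (d.contains w || (t.map (fun x => x.1.1)).contains w) := by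
  intro t
  induction t with
  | nil => intro d w; simp
  | cons x t ih =>
    intro d w
    simp only [List.foldl_cons, ih, PySem.Dict.contains_modify, List.map_cons, List.contains_cons]
    cases h1 : w == x.1.1 <;> cases h2 : d.contains w <;> simp

-- the aggregation dict's entry at w is the pair of sums of the zip entries keyed w
theorem pv_dict_getD :
    ∀ (t : List ((String × Int) × Int)) (d : PySem.Dict String (Int × Int)) (w : String),
      (t.foldl (fun d x => d.modify x.1.1 (0, 0) (fun s => (s.1 + x.1.2, s.2 + x.2))) d).getD w (0, 0)
        = ((d.getD w (0, 0)).1 + ((t.filter (fun x => x.1.1 == w)).map (fun x => x.1.2)).sum,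
           (d.getD w (0, 0)).2 + ((t.filter (fun x => x.1.1 == w)).map (fun x => x.2)).sum) := by
  intro t
  induction t with
  | nil => intro d w; simp
  | cons x t ih =>
    intro d w
    simp only [List.foldl_cons, ih, PySem.Dict.getD_modify]
    by_cases h : x.1.1 = w
    · subst h
      simp [List.filter_cons, add_assoc]
    · have : (x.1.1 == w) = false := by simp [h]
      simp [List.filter_cons, this, Ne.symm h, h]

-- A's per-index conditional sums equal the filtered sums over the zipped triples
theorem pv_aside (ws : List String) :
    ∀ (V : List String) (P N : List Int),
      (∀ k, (hk : k < V.length) → ws.contains (V.getD k "") = true → k < P.length ∧ k < N.length) →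
      ((List.range V.length).map (fun k => if ws.contains (V.getD k "") then P.getD k 0 else 0)).sum
          = ((((V.zip P).zip N).filter (fun x => ws.contains x.1.1)).map (fun x => x.1.2)).sum
      ∧ ((List.range V.length).map (fun k => if ws.contains (V.getD k "") then N.getD k 0 else 0)).sum
          = ((((V.zip P).zip N).filter (fun x => ws.contains x.1.1)).map (fun x => x.2)).sum := by
  intro V
  induction V with
  | nil => intro P N _; simp
  | cons v V ih =>
    intro P N hpre
    have hzero : ∀ (Q : List Int), P = [] ∨ N = [] →
        ((List.range (v :: V).length).map
          (fun k => if ws.contains ((v :: V).getD k "") then Q.getD k 0 else 0)).sum = 0 := by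
      intro Q hPN
      have hall : ∀ k ∈ List.range (v :: V).length,
          (if ws.contains ((v :: V).getD k "") = true then Q.getD k 0 else 0) = 0 := by
        intro k hk
        by_cases hc : ws.contains ((v :: V).getD k "") = true
        · exfalso
          have h2 := hpre k (List.mem_range.mp hk) hc
          rcases hPN with h | h <;> rw [h] at h2 <;> simp only [List.length_nil] at h2 <;> omega
        · rw [if_neg hc]
      rw [List.map_congr_left hall]
      simp
    match P, N with
    | [], N =>
      refine ⟨?_, ?_⟩
      · rw [hzero [] (Or.inl rfl)]; simp
      · rw [hzero N (Or.inl rfl)]; simp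
    | p :: P, [] =>
      refine ⟨?_, ?_⟩
      · rw [hzero (p :: P) (Or.inr rfl)]; simp
      · rw [hzero [] (Or.inr rfl)]; simp
    | p :: P, q :: N =>
      have hpre' : ∀ k, (hk : k < V.length) → ws.contains (V.getD k "") = true →
          k < P.length ∧ k < N.length := by
        intro k hk hc
        have h2 := hpre (k + 1) (by simpa using Nat.succ_lt_succ hk) (by simpa using hc)
        simp only [List.length_cons] at h2
        omega
      obtain ⟨ih1, ih2⟩ := ih P N hpre'
      constructor
      · simp only [List.length_cons, List.range_succ_eq_map, List.map_cons, List.map_map, List.sum_cons]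
        have htail : List.map
              ((fun k => if ws.contains ((v :: V).getD k "") = true then (p :: P).getD k 0 else 0) ∘ Nat.succ)
              (List.range V.length)
            = List.map (fun k => if ws.contains (V.getD k "") = true then P.getD k 0 else 0)
              (List.range V.length) :=
          List.map_congr_left (fun k _ => by simp [Function.comp])
        rw [htail, ih1]
        by_cases h : v ∈ ws
        · have hb : ws.contains v = true := by simpa using h
          simp [List.zip_cons_cons, List.filter_cons, h, hb]
        · have hb : ws.contains v = false := by simpa using h
          simp [List.zip_cons_cons, List.filter_cons, h, hb]
      · simp only [List.length_cons, List.range_succ_eq_map, List.map_cons, List.map_map, List.sum_cons]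
        have htail : List.map
              ((fun k => if ws.contains ((v :: V).getD k "") = true then (q :: N).getD k 0 else 0) ∘ Nat.succ)
              (List.range V.length)
            = List.map (fun k => if ws.contains (V.getD k "") = true then N.getD k 0 else 0)
              (List.range V.length) :=
          List.map_congr_left (fun k _ => by simp [Function.comp])
        rw [htail, ih2]
        by_cases h : v ∈ ws
        · have hb : ws.contains v = true := by simpa using h
          simp [List.zip_cons_cons, List.filter_cons, h, hb]
        · have hb : ws.contains v = false := by simpa using h
          simp [List.zip_cons_cons, List.filter_cons, h, hb]

-- the feature vector is the 0/1 image of the vocabulary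
theorem pv_fv_eq (review : String) (V : List String) :
    create_feature_vector review V
      = V.map (fun w => if (PySem.Str.split₀ (PySem.Str.lower review)).contains w then (1 : Int) else 0) := by
  simp only [create_feature_vector]
  have hstep : List.foldl (fun fv word =>
        if (PySem.Str.split₀ (PySem.Str.lower review)).contains word = true then fv ++ [(1 : Int)]
        else fv ++ [(0 : Int)]) [] V
      = List.foldl (fun acc w =>
        acc ++ [if (PySem.Str.split₀ (PySem.Str.lower review)).contains w = true then (1 : Int) else 0]) [] V :=
    PySem.List.foldl_congr_mem V _ _ []
      (by intro acc x _
          by_cases hm : x ∈ PySem.Str.split₀ (PySem.Str.lower review) <;> simp [hm])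
  rw [hstep, PySem.List.foldl_append_singleton_eq_map]
  simp

-- ===== VERDICT (by name: the statement is the Claim_ definition above) =====
theorem classify_review_spec : Claim_equal_classify_review := by
  intro review V P N _ hpre
  show classify_review review V P N = classify_review_alt review V P N
  simp only [classify_review, classify_review_alt]
  set ws := PySem.Str.split₀ (PySem.Str.lower review) with hws
  set t := (V.zip P).zip N with ht
  set W := PySem.Set.ofList ws with hWdef
  have hWnodup : W.Nodup := PySem.Set.nodup_ofList ws
  -- A side
  have hA : (PySem.List.pyRange 0 (V.length : Int) 1).foldl
      (fun (s : Int × Int) i =>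
        if PySem.List.pyGetD (create_feature_vector review V) i 0 == 1 then
          (s.1 + PySem.List.pyGetD P i 0, s.2 + PySem.List.pyGetD N i 0)
        else s) (0, 0)
      = (((List.range V.length).map (fun k => if ws.contains (V.getD k "") then P.getD k 0 else 0)).sum,
         ((List.range V.length).map (fun k => if ws.contains (V.getD k "") then N.getD k 0 else 0)).sum) := by
    rw [PySem.List.pyRange_one, List.foldl_map]
    simp only [Int.sub_zero, Int.toNat_natCast, Int.zero_add, PySem.List.pyGetD_natCast]
    rw [pv_foldl_pair_if]
    have hc : ∀ k ∈ List.range V.length,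
        ((create_feature_vector review V).getD k 0 == 1) = ws.contains (V.getD k "") := by
      intro k hk
      have hk' : k < V.length := List.mem_range.mp hk
      rw [pv_fv_eq, ← hws]
      rw [List.getD_eq_getElem?_getD, List.getElem?_map, List.getElem?_eq_getElem hk']
      rw [List.getD_eq_getElem _ _ hk']
      by_cases hm : V[k] ∈ ws <;> simp [hm]
    simp only [Prod.mk.injEq]
    refine ⟨?_, ?_⟩ <;>
    · rw [zero_add]
      exact congrArg List.sum (List.map_congr_left (fun k hk => by rw [hc k hk]))
  rw [hA]
  -- B side
  have hkeys : ∀ w : String,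
      ((t.foldl (fun d x => d.modify x.1.1 (0, 0) (fun s => (s.1 + x.1.2, s.2 + x.2)))
          PySem.Dict.empty).contains w) = (t.map (fun x => x.1.1)).contains w := by
    intro w
    rw [pv_dict_contains]
    simp
  have hB : W.foldl
      (fun (s : Int × Int) word =>
        if (t.foldl (fun d x => d.modify x.1.1 (0, 0) (fun s => (s.1 + x.1.2, s.2 + x.2)))
            PySem.Dict.empty).contains word then
          (s.1 + ((t.foldl (fun d x => d.modify x.1.1 (0, 0) (fun s => (s.1 + x.1.2, s.2 + x.2)))
              PySem.Dict.empty).getD word (0, 0)).1,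
           s.2 + ((t.foldl (fun d x => d.modify x.1.1 (0, 0) (fun s => (s.1 + x.1.2, s.2 + x.2)))
              PySem.Dict.empty).getD word (0, 0)).2)
        else s) (0, 0)
      = (((t.filter (fun x => ws.contains x.1.1)).map (fun x => x.1.2)).sum,
         ((t.filter (fun x => ws.contains x.1.1)).map (fun x => x.2)).sum) := by
    rw [pv_foldl_pair_if]
    have hterm1 : ∀ w ∈ W,
        (if (t.foldl (fun d x => d.modify x.1.1 (0, 0) (fun s => (s.1 + x.1.2, s.2 + x.2)))
            PySem.Dict.empty).contains w then
          ((t.foldl (fun d x => d.modify x.1.1 (0, 0) (fun s => (s.1 + x.1.2, s.2 + x.2)))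
              PySem.Dict.empty).getD w (0, 0)).1 else 0)
          = ((t.filter (fun x => x.1.1 == w)).map (fun x => x.1.2)).sum := by
      intro w _
      by_cases h : (t.foldl (fun d x => d.modify x.1.1 (0, 0) (fun s => (s.1 + x.1.2, s.2 + x.2)))
          PySem.Dict.empty).contains w = true
      · simp [h, pv_dict_getD]
      · have hnk := hkeys w
        rw [Bool.not_eq_true] at h
        rw [h] at hnk
        have hfil : t.filter (fun x => x.1.1 == w) = [] := by
          rw [List.filter_eq_nil_iff]
          intro x hx hbeq
          have hmem : w ∈ t.map (fun x => x.1.1) := by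
            have : x.1.1 = w := by simpa using hbeq
            exact this ▸ List.mem_map_of_mem hx
          rw [← List.contains_iff_mem, ← hnk] at hmem
          exact Bool.false_ne_true hmem
        simp [h, hfil]
    have hterm2 : ∀ w ∈ W,
        (if (t.foldl (fun d x => d.modify x.1.1 (0, 0) (fun s => (s.1 + x.1.2, s.2 + x.2)))
            PySem.Dict.empty).contains w then
          ((t.foldl (fun d x => d.modify x.1.1 (0, 0) (fun s => (s.1 + x.1.2, s.2 + x.2)))
              PySem.Dict.empty).getD w (0, 0)).2 else 0)
          = ((t.filter (fun x => x.1.1 == w)).map (fun x => x.2)).sum := by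
      intro w _
      by_cases h : (t.foldl (fun d x => d.modify x.1.1 (0, 0) (fun s => (s.1 + x.1.2, s.2 + x.2)))
          PySem.Dict.empty).contains w = true
      · simp [h, pv_dict_getD]
      · have hnk := hkeys w
        rw [Bool.not_eq_true] at h
        rw [h] at hnk
        have hfil : t.filter (fun x => x.1.1 == w) = [] := by
          rw [List.filter_eq_nil_iff]
          intro x hx hbeq
          have hmem : w ∈ t.map (fun x => x.1.1) := by
            have : x.1.1 = w := by simpa using hbeq
            exact this ▸ List.mem_map_of_mem hx
          rw [← List.contains_iff_mem, ← hnk] at hmem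
          exact Bool.false_ne_true hmem
        simp [h, hfil]
    have hfiltcongr : t.filter (fun x => List.contains W x.1.1) = t.filter (fun x => ws.contains x.1.1) := by
      apply List.filter_congr
      intro x _
      by_cases hm : x.1.1 ∈ ws
      · have hmW : x.1.1 ∈ W := (PySem.Set.mem_ofList ws x.1.1).mpr hm
        simp [hm, hmW]
      · have hmW : x.1.1 ∉ W := fun hx => hm ((PySem.Set.mem_ofList ws x.1.1).mp hx)
        simp [hm, hmW]
    rw [List.map_congr_left hterm1, List.map_congr_left hterm2,
        pv_group_sum (fun x => x.1.1) (fun x => x.1.2) t W hWnodup,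
        pv_group_sum (fun x => x.1.1) (fun x => x.2) t W hWnodup, hfiltcongr]
    simp
  rw [hB]
  -- connect via pv_aside
  have hpre' : ∀ k, (hk : k < V.length) → ws.contains (V.getD k "") = true →
      k < P.length ∧ k < N.length := by
    intro k hk hc
    have := hpre ⟨k, hk⟩ (by rwa [List.getD_eq_getElem _ _ hk] at hc)
    exact this
  obtain ⟨h1, h2⟩ := pv_aside ws V P N hpre'
  rw [h1, h2]
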